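-- pv_equiv track=rewrite | github.com/izotomas/CVUT---Cybernetics-and-AI | labs/reversi/reversiutils.py | get_all_valid_moves2d
-- ===== SOURCE A (Python) =====
-- def get_all_valid_moves2d(board, player_color, opponent_color):
--     board_size = len(board)
--     valid_moves = []
--     for x in range(board_size):
--         for y in range(board_size):
--             if (board[x][y] == -1) and __is_correct_move2d([x, y], board, board_size, player_color, opponent_color):
--                 valid_moves.append((x, y))
--
--     return valid_moves
--
-- def __is_correct_move2d(move, board, board_size, player_color, opponent_color):
--     dx = [-1, -1, -1, 0, 1, 1, 1, 0]
--     dy = [-1, 0, 1, 1, 1, 0, -1, -1]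
--     for i in range(len(dx)):
--         if __confirm_direction2d(move, dx[i], dy[i], board, board_size, player_color, opponent_color):
--             return True
--     return False
--
-- def __confirm_direction2d(move, dx, dy, board, board_size, player_color, opponent_color):
--     posx = move[0] + dx
--     posy = move[1] + dy
--     if (posx >= 0) and (posx < board_size) and (posy >= 0) and (posy < board_size):
--         if board[posx][posy] == opponent_color:
--             while (posx >= 0) and (posx <= (board_size - 1)) and (posy >= 0) and (posy <= (board_size - 1)):
--                 posx += dx
--                 posy += dy
--                 if (posx >= 0) and (posx < board_size) and (posy >= 0) and (posy < board_size):
--                     if board[posx][posy] == -1: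
--                         return False
--                     if board[posx][posy] == player_color:
--                         return True
--
--     return False
-- ===== SOURCE B (Python) =====
-- def get_all_valid_moves2d(board, player_color, opponent_color):
--     n = len(board)
--     dirs = [(-1, -1), (-1, 0), (-1, 1), (0, 1), (1, 1), (1, 0), (1, -1), (0, -1)]
--     marked = set()
--     for dx, dy in dirs:
--         # scan every maximal line in direction (dx, dy) once, back to front
--         starts = [(x, y) for x in range(n) for y in range(n)
--                   if not (0 <= x - dx < n and 0 <= y - dy < n)]
--         for sx, sy in starts:
--             cells = []
--             x, y = sx, sy
--             while 0 <= x < n and 0 <= y < n: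
--                 cells.append((x, y))
--                 x += dx
--                 y += dy
--             st = False   # does the ray just beyond the current cell close with our color?
--             ok = False   # was the previously processed cell an opponent stone with st set?
--             for cx, cy in reversed(cells):
--                 if ok:
--                     marked.add((cx, cy))
--                 v = board[cx][cy]
--                 ok = (v == opponent_color) and st
--                 st = False if v == -1 else (True if v == player_color else st)
--     return [(x, y) for x in range(n) for y in range(n)
--             if board[x][y] == -1 and (x, y) in marked]
-- ===== Notes on version B (the rewrite author's own statement) =====
-- stated objective: alternative
-- what changed: B replaces A's per-empty-cell ray walk (for every cell, walk each of the 8 directions until the line resolves) by one backward sweep over every maximal line of the board per direction, carrying a 'line closes with our color' state and marking bracketed cells, then filtering the empty marked cells.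
import Mathlib
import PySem

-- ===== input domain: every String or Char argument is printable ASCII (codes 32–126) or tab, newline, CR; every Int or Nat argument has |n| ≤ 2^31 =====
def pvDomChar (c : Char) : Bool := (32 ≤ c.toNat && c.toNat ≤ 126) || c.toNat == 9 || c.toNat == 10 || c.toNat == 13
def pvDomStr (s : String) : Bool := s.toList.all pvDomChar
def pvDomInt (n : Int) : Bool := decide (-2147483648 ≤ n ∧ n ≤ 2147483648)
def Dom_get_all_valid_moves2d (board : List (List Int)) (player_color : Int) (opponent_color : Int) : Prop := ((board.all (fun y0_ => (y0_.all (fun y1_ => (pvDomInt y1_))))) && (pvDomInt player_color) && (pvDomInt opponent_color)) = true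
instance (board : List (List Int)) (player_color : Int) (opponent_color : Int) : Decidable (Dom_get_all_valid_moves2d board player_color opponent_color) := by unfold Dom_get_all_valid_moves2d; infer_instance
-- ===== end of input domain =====

-- B sweeps every maximal board line once per direction (backwards, carrying a "line closes
-- with our color" state) and marks bracketed cells, instead of A's per-empty-cell walk along
-- all 8 rays: an alternative line-scan algorithm; the returned move lists are equal.

-- shared primitive accessor: board[x][y]; exact whenever the access is bounds-guarded
-- (as every access in both Pythons is) and Pre_ holds (rows long enough)
def pvCell (board : List (List Int)) (x y : Int) : Int :=
  (PySem.List.pyGet? ((PySem.List.pyGet? board x).getD []) y).getD 0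

-- 0 <= x < n and 0 <= y < n (the bounds test both Pythons repeat)
def pvInb (n x y : Int) : Bool :=
  decide (0 ≤ x) && decide (x < n) && decide (0 ≤ y) && decide (y < n)

-- ===== PORT A =====

-- the while loop of __confirm_direction2d (fuel makes it total; n+1 always suffices, proved below)
def pvLoopA (board : List (List Int)) (n pc dx dy : Int) : Nat → Int → Int → Bool
  | 0, _, _ => false
  | f+1, posx, posy =>
    if decide (0 ≤ posx) && decide (posx ≤ n - 1) && decide (0 ≤ posy) && decide (posy ≤ n - 1) then
      let px := posx + dx
      let py := posy + dy
      if pvInb n px py then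
        if pvCell board px py = -1 then false
        else if pvCell board px py = pc then true
        else pvLoopA board n pc dx dy f px py
      else pvLoopA board n pc dx dy f px py
    else false

-- __confirm_direction2d
def pvConfirmA (board : List (List Int)) (n pc oc dx dy mx my : Int) : Bool :=
  let posx := mx + dx
  let posy := my + dy
  if pvInb n posx posy then
    if pvCell board posx posy = oc then
      pvLoopA board n pc dx dy (n.toNat + 1) posx posy
    else false
  else false

-- __is_correct_move2d (the parallel dx/dy index loop, as an any over the zipped pairs)
def pvIsCorrectA (board : List (List Int)) (n pc oc mx my : Int) : Bool :=
  let dxl : List Int := [-1, -1, -1, 0, 1, 1, 1, 0]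
  let dyl : List Int := [-1, 0, 1, 1, 1, 0, -1, -1]
  (dxl.zip dyl).any (fun d => pvConfirmA board n pc oc d.1 d.2 mx my)

def get_all_valid_moves2d (board : List (List Int)) (player_color : Int) (opponent_color : Int) : List (Int × Int) :=
  let n : Int := (board.length : Int)
  (PySem.List.pyRange 0 n 1).flatMap (fun x =>
    (PySem.List.pyRange 0 n 1).flatMap (fun y =>
      if (pvCell board x y == -1) && pvIsCorrectA board n player_color opponent_color x y
      then [(x, y)] else []))

-- ===== PORT B =====

def pvDirs : List (Int × Int) := [(-1, -1), (-1, 0), (-1, 1), (0, 1), (1, 1), (1, 0), (1, -1), (0, -1)]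

-- the cells-building while loop of Source B (fuel n+1 always suffices, proved below)
def pvLineF (n dx dy : Int) : Nat → Int → Int → List (Int × Int)
  | 0, _, _ => []
  | f+1, x, y => if pvInb n x y then (x, y) :: pvLineF n dx dy f (x + dx) (y + dy) else []

-- one step of Source B's backward scan: state = (st, ok, marked)
def pvScanStep (board : List (List Int)) (pc oc : Int)
    (s : Bool × Bool × PySem.Set (Int × Int)) (c : Int × Int) : Bool × Bool × PySem.Set (Int × Int) :=
  let m := if s.2.1 then PySem.Set.add s.2.2 c else s.2.2
  let v := pvCell board c.1 c.2
  ((if v = -1 then false else if v = pc then true else s.1), (v == oc) && s.1, m)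

-- scan one maximal line, back to front, accumulating marked cells
def pvScanLine (board : List (List Int)) (pc oc n dx dy : Int)
    (m : PySem.Set (Int × Int)) (sx sy : Int) : PySem.Set (Int × Int) :=
  let cells := pvLineF n dx dy (n.toNat + 1) sx sy
  (cells.reverse.foldl (pvScanStep board pc oc) (false, false, m)).2.2

-- the line starts of direction (dx, dy): in-bounds cells whose predecessor is off the board
def pvStartsList (n dx dy : Int) : List (Int × Int) :=
  (PySem.List.pyRange 0 n 1).flatMap (fun x =>
    (PySem.List.pyRange 0 n 1).flatMap (fun y =>
      if pvInb n (x - dx) (y - dy) then [] else [(x, y)]))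

def pvProcessDir (board : List (List Int)) (pc oc n : Int)
    (m : PySem.Set (Int × Int)) (d : Int × Int) : PySem.Set (Int × Int) :=
  (pvStartsList n d.1 d.2).foldl (fun m' s => pvScanLine board pc oc n d.1 d.2 m' s.1 s.2) m

def get_all_valid_moves2d_alt (board : List (List Int)) (player_color : Int) (opponent_color : Int) : List (Int × Int) :=
  let n : Int := (board.length : Int)
  let marked : PySem.Set (Int × Int) :=
    pvDirs.foldl (pvProcessDir board player_color opponent_color n) PySem.Set.empty
  (PySem.List.pyRange 0 n 1).flatMap (fun x =>
    (PySem.List.pyRange 0 n 1).flatMap (fun y =>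
      if (pvCell board x y == -1) && PySem.Set.contains marked (x, y)
      then [(x, y)] else []))

-- ===== PRECONDITION & SPEC =====
-- Pre_ excludes exactly the boards on which Python A raises IndexError: some row
-- shorter than len(board) (the main loop reads board[x][y] for all x, y < len(board)).
def Pre_get_all_valid_moves2d (board : List (List Int)) (player_color : Int) (opponent_color : Int) : Prop :=
  ∀ row ∈ board, board.length ≤ row.length
instance (board : List (List Int)) (player_color : Int) (opponent_color : Int) : Decidable (Pre_get_all_valid_moves2d board player_color opponent_color) := by unfold Pre_get_all_valid_moves2d; infer_instance

def pvWitness_get_all_valid_moves2d : List (List Int) × Int × Int := ([[-1, 1], [0, -1]], 0, 1)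

def Spec_get_all_valid_moves2d (board : List (List Int)) (player_color : Int) (opponent_color : Int) (out : List (Int × Int)) : Prop := out = get_all_valid_moves2d_alt board player_color opponent_color
instance (board : List (List Int)) (player_color : Int) (opponent_color : Int) (out : List (Int × Int)) : Decidable (Spec_get_all_valid_moves2d board player_color opponent_color out) := by unfold Spec_get_all_valid_moves2d; infer_instance

-- ===== CLAIM (what is proved, stated in full; the proofs are below) =====
def Claim_equal_get_all_valid_moves2d : Prop := ∀ (board : List (List Int)) (player_color : Int) (opponent_color : Int), Dom_get_all_valid_moves2d board player_color opponent_color → Pre_get_all_valid_moves2d board player_color opponent_color → Spec_get_all_valid_moves2d board player_color opponent_color (get_all_valid_moves2d board player_color opponent_color)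

-- ===== LEMMAS AND PROOFS =====

-- the 8 legal direction vectors, as a case-splittable proposition
def pvDirOk (dx dy : Int) : Prop :=
  (dx, dy) = (-1, -1) ∨ (dx, dy) = (-1, 0) ∨ (dx, dy) = (-1, 1) ∨ (dx, dy) = (0, 1) ∨
  (dx, dy) = (1, 1) ∨ (dx, dy) = (1, 0) ∨ (dx, dy) = (1, -1) ∨ (dx, dy) = (0, -1)

lemma pvDirOk_of_mem {d : Int × Int} (h : d ∈ pvDirs) : pvDirOk d.1 d.2 := by
  fin_cases h <;> simp [pvDirOk]

lemma pvDirOk_neg {dx dy : Int} (h : pvDirOk dx dy) : pvDirOk (-dx) (-dy) := by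
  rcases h with h | h | h | h | h | h | h | h <;>
    (injection h with h1 h2; subst h1; subst h2; simp [pvDirOk])

-- steps-to-exit measure along a direction
def pvMu (n dx dy x y : Int) : Nat :=
  if dx = 1 then (n - x).toNat else if dx = -1 then (x + 1).toNat
  else if dy = 1 then (n - y).toNat else (y + 1).toNat

lemma pvInb_iff {n x y : Int} : pvInb n x y = true ↔ 0 ≤ x ∧ x < n ∧ 0 ≤ y ∧ y < n := by
  simp [pvInb, and_assoc]

lemma pvMu_pos {n dx dy x y : Int} (h : pvDirOk dx dy) (hin : pvInb n x y = true) :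
    1 ≤ pvMu n dx dy x y := by
  rw [pvInb_iff] at hin
  rcases h with h | h | h | h | h | h | h | h <;>
    (injection h with h1 h2; subst h1; subst h2; simp [pvMu]; omega)

lemma pvMu_lt {n dx dy x y : Int} (h : pvDirOk dx dy) (hin : pvInb n x y = true) :
    pvMu n dx dy (x + dx) (y + dy) < pvMu n dx dy x y := by
  rw [pvInb_iff] at hin
  rcases h with h | h | h | h | h | h | h | h <;>
    (injection h with h1 h2; subst h1; subst h2; simp [pvMu]; omega)

lemma pvMu_lt' {n dx dy x y : Int} (h : pvDirOk dx dy) (hin : pvInb n (x + dx) (y + dy) = true) :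
    pvMu n dx dy (x + dx) (y + dy) < pvMu n dx dy x y := by
  rw [pvInb_iff] at hin
  rcases h with h | h | h | h | h | h | h | h <;>
    (injection h with h1 h2; subst h1; subst h2; simp [pvMu]; omega)

lemma pvMu_le {n dx dy x y : Int} (h : pvDirOk dx dy) (hin : pvInb n x y = true) :
    pvMu n dx dy x y ≤ n.toNat := by
  rw [pvInb_iff] at hin
  rcases h with h | h | h | h | h | h | h | h <;>
    (injection h with h1 h2; subst h1; subst h2; simp [pvMu]; omega)

lemma pvMu_step_le {n dx dy x y : Int} (h : pvDirOk dx dy) (hin : pvInb n x y = true) :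
    pvMu n dx dy (x + dx) (y + dy) ≤ n.toNat := by
  rw [pvInb_iff] at hin
  rcases h with h | h | h | h | h | h | h | h <;>
    (injection h with h1 h2; subst h1; subst h2; simp [pvMu]; omega)

-- the resolution of the ray starting at (x, y): false if it hits the edge or an empty
-- cell first, true if it hits a player stone first, skipping all other values (fueled)
def pvFk (board : List (List Int)) (n pc dx dy : Int) : Nat → Int → Int → Bool
  | 0, _, _ => false
  | f+1, x, y =>
    if pvInb n x y then
      if pvCell board x y = -1 then false
      else if pvCell board x y = pc then true
      else pvFk board n pc dx dy f (x + dx) (y + dy)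
    else false

def pvF (board : List (List Int)) (n pc dx dy x y : Int) : Bool :=
  pvFk board n pc dx dy (pvMu n dx dy x y) x y

lemma pvFk_notin {board n pc dx dy x y} (h : pvInb n x y = false) (f : Nat) :
    pvFk board n pc dx dy f x y = false := by
  cases f <;> simp [pvFk, h]

lemma pvFk_stable {board n pc dx dy} (h : pvDirOk dx dy) :
    ∀ f g x y, pvMu n dx dy x y ≤ f → pvMu n dx dy x y ≤ g →
      pvFk board n pc dx dy f x y = pvFk board n pc dx dy g x y := by
  intro f
  induction f with
  | zero =>
    intro g x y hf _
    have hin : pvInb n x y = false := by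
      cases hi : pvInb n x y
      · rfl
      · exact absurd (pvMu_pos h hi) (by omega)
    rw [pvFk_notin hin, pvFk_notin hin]
  | succ f IH =>
    intro g x y hf hg
    cases hin : pvInb n x y
    · rw [pvFk_notin hin, pvFk_notin hin]
    · have h1 := pvMu_pos h hin
      obtain ⟨g', rfl⟩ : ∃ g', g = g' + 1 := ⟨g - 1, by omega⟩
      simp only [pvFk, hin, if_true]
      have hlt := pvMu_lt h hin
      rw [IH g' (x + dx) (y + dy) (by omega) (by omega)]

lemma pvF_unfold {board n pc dx dy x y} (h : pvDirOk dx dy) :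
    pvF board n pc dx dy x y =
      if pvInb n x y then
        if pvCell board x y = -1 then false
        else if pvCell board x y = pc then true
        else pvF board n pc dx dy (x + dx) (y + dy)
      else false := by
  unfold pvF
  cases hin : pvInb n x y
  · simp [pvFk_notin hin]
  · obtain ⟨m, hm⟩ : ∃ m, pvMu n dx dy x y = m + 1 := ⟨pvMu n dx dy x y - 1, by have := pvMu_pos h hin; omega⟩
    rw [hm]
    simp only [pvFk, hin, if_true]
    have hlt := pvMu_lt h hin
    rw [pvFk_stable h m (pvMu n dx dy (x + dx) (y + dy)) (x + dx) (y + dy) (by omega) (le_refl _)]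

-- the condition shared by both programs: (x, y) holds an opponent stone whose ray
-- onward resolves to a player stone (A marks (x,y)-d via this; B's scan marks the same)
def pvOk (board : List (List Int)) (n pc oc dx dy x y : Int) : Bool :=
  pvInb n x y && ((pvCell board x y == oc) && pvF board n pc dx dy (x + dx) (y + dy))

-- ===== A-side characterization =====

lemma pvLoopA_notin {board n pc dx dy x y} (h : pvInb n x y = false) (f : Nat) :
    pvLoopA board n pc dx dy f x y = false := by
  have h' : (decide (0 ≤ x) && decide (x ≤ n - 1) && decide (0 ≤ y) && decide (y ≤ n - 1)) = false := by
    rw [pvInb] at h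
    simp only [Bool.and_eq_false_iff, decide_eq_false_iff_not] at h ⊢
    omega
  cases f
  · rfl
  · simp only [pvLoopA, h', Bool.false_eq_true, if_false]

lemma pvLoopA_eq {board n pc dx dy} (h : pvDirOk dx dy) :
    ∀ f x y, pvInb n x y = true → pvMu n dx dy (x + dx) (y + dy) ≤ f →
      pvLoopA board n pc dx dy (f + 1) x y = pvF board n pc dx dy (x + dx) (y + dy) := by
  intro f
  induction f with
  | zero =>
    intro x y hin hμ
    have hin' : pvInb n (x + dx) (y + dy) = false := by
      cases hi : pvInb n (x + dx) (y + dy)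
      · rfl
      · exact absurd (pvMu_pos h hi) (by omega)
    have hc : (decide (0 ≤ x) && decide (x ≤ n - 1) && decide (0 ≤ y) && decide (y ≤ n - 1)) = true := by
      rw [pvInb_iff] at hin
      simp only [Bool.and_eq_true, decide_eq_true_eq]
      omega
    simp only [pvLoopA, hc, if_true, hin', Bool.false_eq_true, if_false]
    rw [pvF_unfold h (x := x + dx) (y := y + dy), hin']
    simp
  | succ f IH =>
    intro x y hin hμ
    have hc : (decide (0 ≤ x) && decide (x ≤ n - 1) && decide (0 ≤ y) && decide (y ≤ n - 1)) = true := by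
      rw [pvInb_iff] at hin
      simp only [Bool.and_eq_true, decide_eq_true_eq]
      omega
    rw [pvF_unfold h (x := x + dx) (y := y + dy)]
    cases hin' : pvInb n (x + dx) (y + dy)
    · rw [show pvLoopA board n pc dx dy (f + 1 + 1) x y
          = (if (decide (0 ≤ x) && decide (x ≤ n - 1) && decide (0 ≤ y) && decide (y ≤ n - 1)) = true then
              if pvInb n (x + dx) (y + dy) = true then
                if pvCell board (x + dx) (y + dy) = -1 then false
                else if pvCell board (x + dx) (y + dy) = pc then true
                else pvLoopA board n pc dx dy (f + 1) (x + dx) (y + dy)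
              else pvLoopA board n pc dx dy (f + 1) (x + dx) (y + dy)
            else false) from rfl, hc, if_pos rfl, hin']
      simp only [Bool.false_eq_true, if_false]
      exact pvLoopA_notin hin' (f + 1)
    · have hlt := pvMu_lt h hin'
      simp only [pvLoopA, hc, if_true, hin']
      split
      · rfl
      · split
        · rfl
        · exact IH (x + dx) (y + dy) hin' (by omega)

lemma pvConfirmA_eq {board n pc oc dx dy mx my} (h : pvDirOk dx dy) :
    pvConfirmA board n pc oc dx dy mx my = pvOk board n pc oc dx dy (mx + dx) (my + dy) := by
  unfold pvConfirmA pvOk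
  cases hin : pvInb n (mx + dx) (my + dy)
  · simp [hin]
  · simp only [hin, if_true, Bool.true_and]
    cases hoc : (pvCell board (mx + dx) (my + dy) == oc)
    · simp [beq_eq_false_iff_ne.mp hoc]
    · have hE := beq_iff_eq.mp hoc
      simp only [hE, Bool.true_and]
      exact pvLoopA_eq h n.toNat (mx + dx) (my + dy) hin (pvMu_step_le h hin)

lemma pvIsCorrectA_eq (board : List (List Int)) (n pc oc mx my : Int) :
    pvIsCorrectA board n pc oc mx my =
      pvDirs.any (fun d => pvOk board n pc oc d.1 d.2 (mx + d.1) (my + d.2)) := by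
  rw [show pvIsCorrectA board n pc oc mx my
      = pvDirs.any (fun d => pvConfirmA board n pc oc d.1 d.2 mx my) from rfl]
  exact PySem.List.any_congr_mem (fun d hd => pvConfirmA_eq (pvDirOk_of_mem hd))

-- ===== B-side characterization =====

-- the maximal in-bounds line from (x, y) along (dx, dy)
def pvLine (n dx dy x y : Int) : List (Int × Int) :=
  pvLineF n dx dy (pvMu n dx dy x y) x y

lemma pvLineF_notin {n dx dy x y} (h : pvInb n x y = false) (f : Nat) :
    pvLineF n dx dy f x y = [] := by
  cases f <;> simp [pvLineF, h]

lemma pvLineF_stable {n dx dy} (h : pvDirOk dx dy) :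
    ∀ f g x y, pvMu n dx dy x y ≤ f → pvMu n dx dy x y ≤ g →
      pvLineF n dx dy f x y = pvLineF n dx dy g x y := by
  intro f
  induction f with
  | zero =>
    intro g x y hf _
    have hin : pvInb n x y = false := by
      cases hi : pvInb n x y
      · rfl
      · exact absurd (pvMu_pos h hi) (by omega)
    rw [pvLineF_notin hin, pvLineF_notin hin]
  | succ f IH =>
    intro g x y hf hg
    cases hin : pvInb n x y
    · rw [pvLineF_notin hin, pvLineF_notin hin]
    · have h1 := pvMu_pos h hin
      obtain ⟨g', rfl⟩ : ∃ g', g = g' + 1 := ⟨g - 1, by omega⟩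
      simp only [pvLineF, hin, if_true]
      have hlt := pvMu_lt h hin
      rw [IH g' (x + dx) (y + dy) (by omega) (by omega)]

lemma pvLine_unfold {n dx dy x y} (h : pvDirOk dx dy) :
    pvLine n dx dy x y =
      if pvInb n x y then (x, y) :: pvLine n dx dy (x + dx) (y + dy) else [] := by
  unfold pvLine
  cases hin : pvInb n x y
  · simp [pvLineF_notin hin]
  · obtain ⟨m, hm⟩ : ∃ m, pvMu n dx dy x y = m + 1 := ⟨pvMu n dx dy x y - 1, by have := pvMu_pos h hin; omega⟩
    rw [hm]
    simp only [pvLineF, hin, if_true]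
    have hlt := pvMu_lt h hin
    rw [pvLineF_stable h m (pvMu n dx dy (x + dx) (y + dy)) (x + dx) (y + dy) (by omega) (le_refl _)]

lemma pvLineF_eq_pvLine {n dx dy x y} (h : pvDirOk dx dy) :
    pvLineF n dx dy (n.toNat + 1) x y = pvLine n dx dy x y := by
  cases hin : pvInb n x y
  · rw [pvLineF_notin hin, pvLine, pvLineF_notin hin]
  · exact pvLineF_stable h (n.toNat + 1) (pvMu n dx dy x y) x y
      (by have := pvMu_le h hin; omega) (le_refl _)

-- Source B's backward scan of one line, fully characterized: final st is the line's
-- resolution, final ok is pvOk at the line head, and the marked set gains exactly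
-- the line cells whose successor satisfies pvOk
lemma pvScan_char {board : List (List Int)} {pc oc n dx dy : Int} (h : pvDirOk dx dy) :
    ∀ (k : Nat) (x y : Int) (m : PySem.Set (Int × Int)), pvMu n dx dy x y = k →
      ((pvLine n dx dy x y).reverse.foldl (pvScanStep board pc oc) (false, false, m)).1
          = pvF board n pc dx dy x y ∧
      ((pvLine n dx dy x y).reverse.foldl (pvScanStep board pc oc) (false, false, m)).2.1
          = pvOk board n pc oc dx dy x y ∧
      (∀ c : Int × Int,
        c ∈ ((pvLine n dx dy x y).reverse.foldl (pvScanStep board pc oc) (false, false, m)).2.2 ↔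
        c ∈ m ∨ (c ∈ pvLine n dx dy x y ∧ pvOk board n pc oc dx dy (c.1 + dx) (c.2 + dy) = true)) := by
  intro k
  induction k using Nat.strong_induction_on with
  | _ k IH =>
    intro x y m hk
    rw [List.foldl_reverse]
    cases hin : pvInb n x y
    · rw [pvLine_unfold h, hin]
      simp only [Bool.false_eq_true, if_false, List.foldr_nil]
      refine ⟨?_, ?_, ?_⟩
      · rw [pvF_unfold h, hin]; rfl
      · unfold pvOk; rw [hin]; rfl
      · intro c
        simp
    · have hlt := pvMu_lt h hin
      have hIH := IH (pvMu n dx dy (x + dx) (y + dy)) (by omega) (x + dx) (y + dy) m rfl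
      rw [List.foldl_reverse] at hIH
      obtain ⟨h1, h2, h3⟩ := hIH
      rw [pvLine_unfold h (x := x) (y := y), hin]
      simp only [if_true, List.foldr_cons]
      set r := (pvLine n dx dy (x + dx) (y + dy)).foldr
        (fun c s => pvScanStep board pc oc s c) (false, false, m) with hr
      refine ⟨?_, ?_, ?_⟩
      · show (if pvCell board x y = -1 then false
              else if pvCell board x y = pc then true else r.1) = _
        rw [pvF_unfold h (x := x) (y := y), hin, h1]
        simp
      · show ((pvCell board x y == oc) && r.1) = _
        unfold pvOk
        rw [hin, h1]
        simp
      · intro c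
        show c ∈ (if r.2.1 then PySem.Set.add r.2.2 (x, y) else r.2.2) ↔ _
        constructor
        · intro hc
          by_cases hok : r.2.1 = true
          · rw [hok, if_pos rfl, PySem.Set.mem_add] at hc
            rcases hc with hc | hc
            · rcases (h3 c).mp hc with hm | ⟨hl, ho⟩
              · exact Or.inl hm
              · exact Or.inr ⟨List.mem_cons_of_mem _ hl, ho⟩
            · subst hc
              rw [h2] at hok
              exact Or.inr ⟨List.mem_cons_self, hok⟩
          · rw [Bool.not_eq_true] at hok
            rw [hok] at hc
            simp only [Bool.false_eq_true, if_false] at hc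
            rcases (h3 c).mp hc with hm | ⟨hl, ho⟩
            · exact Or.inl hm
            · exact Or.inr ⟨List.mem_cons_of_mem _ hl, ho⟩
        · intro hc
          have hsub : c ∈ r.2.2 → c ∈ (if r.2.1 then PySem.Set.add r.2.2 (x, y) else r.2.2) := by
            intro hc'
            split
            · rw [PySem.Set.mem_add]
              exact Or.inl hc' 
            · exact hc'
          rcases hc with hm | ⟨hl, ho⟩
          · exact hsub ((h3 c).mpr (Or.inl hm))
          · rcases List.mem_cons.mp hl with rfl | hl'
            · have hok : r.2.1 = true := by rw [h2]; exact ho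
              rw [hok, if_pos rfl, PySem.Set.mem_add]
              exact Or.inr rfl
            · exact hsub ((h3 c).mpr (Or.inr ⟨hl', ho⟩))

lemma pvScanLine_char {board : List (List Int)} {pc oc n dx dy : Int} (h : pvDirOk dx dy)
    (m : PySem.Set (Int × Int)) (sx sy : Int) (c : Int × Int) :
    c ∈ pvScanLine board pc oc n dx dy m sx sy ↔
      c ∈ m ∨ (c ∈ pvLine n dx dy sx sy ∧ pvOk board n pc oc dx dy (c.1 + dx) (c.2 + dy) = true) := by
  unfold pvScanLine
  rw [pvLineF_eq_pvLine h]
  exact (pvScan_char h (pvMu n dx dy sx sy) sx sy m rfl).2.2 c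

lemma mem_pvStartsList {n dx dy : Int} {c : Int × Int} :
    c ∈ pvStartsList n dx dy ↔
      pvInb n c.1 c.2 = true ∧ pvInb n (c.1 - dx) (c.2 - dy) = false := by
  unfold pvStartsList
  simp only [List.mem_flatMap, PySem.List.mem_pyRange_one]
  constructor
  · rintro ⟨x, hx, y, hy, hc⟩
    split at hc
    · simp at hc
    · next hnb =>
      simp only [List.mem_singleton] at hc
      subst hc
      exact ⟨pvInb_iff.mpr ⟨hx.1, hx.2, hy.1, hy.2⟩, Bool.not_eq_true _ ▸ (by simpa using hnb)⟩
  · rintro ⟨hin, hnb⟩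
    rw [pvInb_iff] at hin
    exact ⟨c.1, ⟨hin.1, hin.2.1⟩, c.2, ⟨hin.2.2.1, hin.2.2.2⟩,
      by rw [hnb]; simp⟩

lemma pvLine_mem_next {n dx dy : Int} (h : pvDirOk dx dy) :
    ∀ (k : Nat) (sx sy x y : Int), pvMu n dx dy sx sy = k →
      pvInb n x y = true → (x - dx, y - dy) ∈ pvLine n dx dy sx sy →
      (x, y) ∈ pvLine n dx dy sx sy := by
  intro k
  induction k using Nat.strong_induction_on with
  | _ k IH =>
    intro sx sy x y hk hin hmem
    rw [pvLine_unfold h] at hmem ⊢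
    cases hs : pvInb n sx sy
    · rw [hs] at hmem
      simp at hmem
    · rw [hs] at hmem
      rw [if_pos rfl] at hmem ⊢
      rcases List.mem_cons.mp hmem with heq | htail
      · rw [Prod.mk.injEq] at heq
        obtain ⟨e1, e2⟩ := heq
        have ex : sx + dx = x := by omega
        have ey : sy + dy = y := by omega
        right
        rw [ex, ey, pvLine_unfold h, hin, if_pos rfl]
        exact List.mem_cons_self
      · right
        exact IH (pvMu n dx dy (sx + dx) (sy + dy)) (hk ▸ pvMu_lt h hs)
          (sx + dx) (sy + dy) x y rfl hin htail

lemma pvCover {n dx dy : Int} (h : pvDirOk dx dy) :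
    ∀ (k : Nat) (x y : Int), pvMu n (-dx) (-dy) x y = k → pvInb n x y = true →
      ∃ s ∈ pvStartsList n dx dy, (x, y) ∈ pvLine n dx dy s.1 s.2 := by
  have hneg := pvDirOk_neg h
  intro k
  induction k using Nat.strong_induction_on with
  | _ k IH =>
    intro x y hk hin
    cases hp : pvInb n (x - dx) (y - dy)
    · refine ⟨(x, y), mem_pvStartsList.mpr ⟨hin, hp⟩, ?_⟩
      rw [pvLine_unfold h, hin]
      exact List.mem_cons_self
    · have hp' : pvInb n (x + -dx) (y + -dy) = true := by
        have : x + -dx = x - dx := by ring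
        have h2 : y + -dy = y - dy := by ring
        rw [this, h2]; exact hp
      have hlt : pvMu n (-dx) (-dy) (x + -dx) (y + -dy) < pvMu n (-dx) (-dy) x y :=
        pvMu_lt' hneg hp'
      obtain ⟨s, hs, hmem⟩ := IH (pvMu n (-dx) (-dy) (x + -dx) (y + -dy)) (hk ▸ hlt)
        (x + -dx) (y + -dy) rfl hp'
      refine ⟨s, hs, ?_⟩
      apply pvLine_mem_next h (pvMu n dx dy s.1 s.2) s.1 s.2 x y rfl hin
      have e1 : x - dx = x + -dx := by ring
      have e2 : y - dy = y + -dy := by ring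
      rw [e1, e2]
      exact hmem

lemma pvFoldStarts_char {board : List (List Int)} {pc oc n dx dy : Int} (h : pvDirOk dx dy) :
    ∀ (l : List (Int × Int)) (m : PySem.Set (Int × Int)) (c : Int × Int),
      c ∈ l.foldl (fun m' s => pvScanLine board pc oc n dx dy m' s.1 s.2) m ↔
      c ∈ m ∨ ∃ s ∈ l, c ∈ pvLine n dx dy s.1 s.2 ∧ pvOk board n pc oc dx dy (c.1 + dx) (c.2 + dy) = true := by
  intro l
  induction l with
  | nil => intro m c; simp
  | cons s t IH =>
    intro m c
    rw [List.foldl_cons, IH, pvScanLine_char h]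
    constructor
    · rintro ((hm | hl) | ⟨s', hs', hl'⟩)
      · exact Or.inl hm
      · exact Or.inr ⟨s, List.mem_cons_self, hl⟩
      · exact Or.inr ⟨s', List.mem_cons_of_mem _ hs', hl'⟩
    · rintro (hm | ⟨s', hs', hl'⟩)
      · exact Or.inl (Or.inl hm)
      · rcases List.mem_cons.mp hs' with rfl | hs''
        · exact Or.inl (Or.inr hl')
        · exact Or.inr ⟨s', hs'', hl'⟩

lemma pvProcessDir_char {board : List (List Int)} {pc oc n : Int} {d : Int × Int}
    (h : pvDirOk d.1 d.2) (m : PySem.Set (Int × Int)) {c : Int × Int}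
    (hin : pvInb n c.1 c.2 = true) :
    c ∈ pvProcessDir board pc oc n m d ↔
      c ∈ m ∨ pvOk board n pc oc d.1 d.2 (c.1 + d.1) (c.2 + d.2) = true := by
  unfold pvProcessDir
  rw [pvFoldStarts_char h]
  constructor
  · rintro (hm | ⟨s, _, _, ho⟩)
    · exact Or.inl hm
    · exact Or.inr ho
  · rintro (hm | ho)
    · exact Or.inl hm
    · obtain ⟨s, hs, hmem⟩ := pvCover h (pvMu n (-d.1) (-d.2) c.1 c.2) c.1 c.2 rfl hin
      exact Or.inr ⟨s, hs, by simpa using hmem, ho⟩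

lemma pvFoldDirs_char {board : List (List Int)} {pc oc n : Int} :
    ∀ (ds : List (Int × Int)), (∀ d ∈ ds, pvDirOk d.1 d.2) →
      ∀ (m : PySem.Set (Int × Int)) (c : Int × Int), pvInb n c.1 c.2 = true →
      (c ∈ ds.foldl (pvProcessDir board pc oc n) m ↔
        c ∈ m ∨ ∃ d ∈ ds, pvOk board n pc oc d.1 d.2 (c.1 + d.1) (c.2 + d.2) = true) := by
  intro ds
  induction ds with
  | nil => intro _ m c _; simp
  | cons d t IH =>
    intro hok m c hin
    rw [List.foldl_cons, IH (fun d' hd' => hok d' (List.mem_cons_of_mem _ hd')) _ c hin,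
      pvProcessDir_char (hok d List.mem_cons_self) m hin]
    constructor
    · rintro ((hm | ho) | ⟨d', hd', ho'⟩)
      · exact Or.inl hm
      · exact Or.inr ⟨d, List.mem_cons_self, ho⟩
      · exact Or.inr ⟨d', List.mem_cons_of_mem _ hd', ho'⟩
    · rintro (hm | ⟨d', hd', ho'⟩)
      · exact Or.inl (Or.inl hm)
      · rcases List.mem_cons.mp hd' with rfl | hd''
        · exact Or.inl (Or.inr ho')
        · exact Or.inr ⟨d', hd'', ho'⟩

-- ===== final assembly =====

lemma pvCond_eq (board : List (List Int)) (pc oc n x y : Int)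
    (hx : 0 ≤ x ∧ x < n) (hy : 0 ≤ y ∧ y < n) :
    pvIsCorrectA board n pc oc x y =
      PySem.Set.contains (pvDirs.foldl (pvProcessDir board pc oc n) PySem.Set.empty) (x, y) := by
  have hin : pvInb n x y = true := pvInb_iff.mpr ⟨hx.1, hx.2, hy.1, hy.2⟩
  rw [pvIsCorrectA_eq]
  have hm := pvFoldDirs_char (board := board) (pc := pc) (oc := oc) (n := n) pvDirs
    (fun d hd => pvDirOk_of_mem hd) PySem.Set.empty (x, y) hin
  cases hA : pvDirs.any (fun d => pvOk board n pc oc d.1 d.2 (x + d.1) (y + d.2))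
  · rw [List.any_eq_false] at hA
    have : ¬ (x, y) ∈ pvDirs.foldl (pvProcessDir board pc oc n) PySem.Set.empty := by
      rw [hm]
      rintro (hmem | ⟨d, hd, ho⟩)
      · simp [PySem.Set.empty] at hmem
      · exact hA d hd ho
    simp only [← PySem.Set.contains_iff] at this
    exact (Bool.not_eq_true _ ▸ this).symm
  · rw [List.any_eq_true] at hA
    obtain ⟨d, hd, ho⟩ := hA
    have : (x, y) ∈ pvDirs.foldl (pvProcessDir board pc oc n) PySem.Set.empty :=
      hm.mpr (Or.inr ⟨d, hd, ho⟩)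
    rw [← PySem.Set.contains_iff] at this
    exact this.symm

-- ===== VERDICT (by name: the statement is the Claim_ definition above) =====
theorem get_all_valid_moves2d_spec : Claim_equal_get_all_valid_moves2d := by
  unfold Claim_equal_get_all_valid_moves2d
  intro board pc oc _ _
  unfold Spec_get_all_valid_moves2d
  unfold get_all_valid_moves2d get_all_valid_moves2d_alt
  apply List.flatMap_congr
  intro x hx
  apply List.flatMap_congr
  intro y hy
  rw [PySem.List.mem_pyRange_one] at hx hy
  rw [pvCond_eq board pc oc (board.length : Int) x y hx hy]
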